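-- pv_equiv track=rewrite | github.com/aiperceivable/apdev | python/src/apdev/check_chars.py | _compute_comment_mask_python
-- ===== SOURCE A (Python) =====
-- def _compute_comment_mask_python(content: str) -> set[int]:
--     mask: set[int] = set()
--     i = 0
--     n = len(content)
--
--     while i < n:
--         # Triple-quoted strings (""" or ''')
--         if i + 2 < n and content[i : i + 3] in ('"""', "'''"):
--             quote = content[i : i + 3]
--             i += 3
--             while i < n:
--                 if content[i] == "\\" and i + 1 < n:
--                     i += 2
--                     continue
--                 if i + 2 < n and content[i : i + 3] == quote:
--                     i += 3
--                     break
--                 i += 1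
--             continue
--
--         # Single / double quoted strings
--         if content[i] in ('"', "'"):
--             quote_char = content[i]
--             i += 1
--             while i < n and content[i] != "\n":
--                 if content[i] == "\\" and i + 1 < n:
--                     i += 2
--                     continue
--                 if content[i] == quote_char:
--                     i += 1
--                     break
--                 i += 1
--             continue
--
--         # Line comment
--         if content[i] == "#":
--             while i < n and content[i] != "\n":
--                 mask.add(i)
--                 i += 1
--             continue
--
--         i += 1
--
--     return mask
-- ===== SOURCE B (Python) =====
-- def _compute_comment_mask_python(content: str) -> set[int]:
--     mask: set[int] = set()
--     n = len(content)
--     i = 0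
--     state = 0  # 0 = NORMAL, 1 = IN_TRIPLE, 2 = IN_STRING, 3 = IN_COMMENT
--     quote = ""
--     while i < n:
--         c = content[i]
--         if state == 0:
--             if i + 2 < n and content[i : i + 3] in ('"""', "'''"):
--                 quote = content[i : i + 3]
--                 i += 3
--                 state = 1
--             elif c in ('"', "'"):
--                 quote = c
--                 i += 1
--                 state = 2
--             elif c == "#":
--                 mask.add(i)
--                 i += 1
--                 state = 3
--             else:
--                 i += 1
--         elif state == 1:
--             if c == "\\" and i + 1 < n:
--                 i += 2
--             elif i + 2 < n and content[i : i + 3] == quote: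
--                 i += 3
--                 state = 0
--             else:
--                 i += 1
--         elif state == 2:
--             if c == "\n":
--                 i += 1
--                 state = 0
--             elif c == "\\" and i + 1 < n:
--                 i += 2
--             elif c == quote:
--                 i += 1
--                 state = 0
--             else:
--                 i += 1
--         else:  # state == 3, line comment
--             if c == "\n":
--                 i += 1
--                 state = 0
--             else:
--                 mask.add(i)
--                 i += 1
--     return mask
-- ===== Notes on version B (the rewrite author's own statement) =====
-- stated objective: simpler
-- what changed: Replaced A's outer while-loop with three nested inner while-loops by one flat single-pass loop over an explicit state variable (NORMAL / IN_TRIPLE / IN_STRING / IN_COMMENT) plus a remembered quote, preserving A's exact boundary checks.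
import Mathlib
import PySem

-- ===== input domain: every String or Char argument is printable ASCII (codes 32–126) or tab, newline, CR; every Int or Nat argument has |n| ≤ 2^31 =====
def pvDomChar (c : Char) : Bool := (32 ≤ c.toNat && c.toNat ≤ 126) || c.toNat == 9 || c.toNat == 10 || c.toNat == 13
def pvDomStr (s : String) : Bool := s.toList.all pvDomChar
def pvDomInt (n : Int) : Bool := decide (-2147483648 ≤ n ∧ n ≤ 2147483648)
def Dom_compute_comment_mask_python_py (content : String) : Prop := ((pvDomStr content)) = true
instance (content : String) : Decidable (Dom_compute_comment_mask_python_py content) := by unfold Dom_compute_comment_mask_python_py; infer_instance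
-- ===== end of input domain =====

-- B rewrites A's nested scanning loops as one flat single-pass loop over an explicit
-- state variable (NORMAL/IN_TRIPLE/IN_STRING/IN_COMMENT); objective: simpler control flow.

-- ===== PORT A =====
-- content[i:i+3] for 0 ≤ i (the only indices that occur): exact as clamped drop/take.
def pvSlice3 (cs : List Char) (i : Nat) : List Char := (cs.drop i).take 3

def pvDq3 : List Char := ['"', '"', '"']
def pvSq3 : List Char := ['\'', '\'', '\'']

-- inner `while` of the triple-quoted branch: returns the index where the loop leaves off
def aTripleScan (cs : List Char) (quote : List Char) (i : Nat) : Nat :=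
  if h : i < cs.length then
    if cs[i] = '\\' ∧ i + 1 < cs.length then aTripleScan cs quote (i + 2)
    else if i + 2 < cs.length ∧ pvSlice3 cs i = quote then i + 3
    else aTripleScan cs quote (i + 1)
  else i
termination_by cs.length - i
decreasing_by all_goals exact Nat.sub_lt_sub_left h (Nat.lt_add_of_pos_right (by decide))

-- inner `while` of the single/double-quoted branch
def aStringScan (cs : List Char) (q : Char) (i : Nat) : Nat :=
  if h : i < cs.length then
    if cs[i] = '\n' then i
    else if cs[i] = '\\' ∧ i + 1 < cs.length then aStringScan cs q (i + 2)
    else if cs[i] = q then i + 1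
    else aStringScan cs q (i + 1)
  else i
termination_by cs.length - i
decreasing_by all_goals exact Nat.sub_lt_sub_left h (Nat.lt_add_of_pos_right (by decide))

-- inner `while` of the comment branch: mask.add(i) appends, exact since i strictly increases
def aCommentScan (cs : List Char) (i : Nat) (mask : List Int) : Nat × List Int :=
  if h : i < cs.length then
    if cs[i] = '\n' then (i, mask)
    else aCommentScan cs (i + 1) (mask ++ [(i : Int)])
  else (i, mask)
termination_by cs.length - i
decreasing_by all_goals exact Nat.sub_lt_sub_left h (Nat.lt_add_of_pos_right (by decide))

theorem aTripleScan_ge (cs : List Char) (quote : List Char) (i : Nat) :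
    i ≤ aTripleScan cs quote i := by
  fun_induction aTripleScan <;> omega

theorem aStringScan_ge (cs : List Char) (q : Char) (i : Nat) :
    i ≤ aStringScan cs q i := by
  fun_induction aStringScan <;> omega

theorem aCommentScan_ge (cs : List Char) (i : Nat) (mask : List Int) :
    i ≤ (aCommentScan cs i mask).1 := by
  fun_induction aCommentScan <;> (simp_all; try omega)

theorem aCommentScan_gt (cs : List Char) (i : Nat) (mask : List Int)
    (h : i < cs.length) (hc : cs[i] ≠ '\n') : i < (aCommentScan cs i mask).1 := by
  rw [aCommentScan, dif_pos h, if_neg hc]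
  have := aCommentScan_ge cs (i + 1) (mask ++ [(i : Int)])
  omega

-- the outer `while` of A
def aOuter (cs : List Char) (i : Nat) (mask : List Int) : List Int :=
  if h : i < cs.length then
    if i + 2 < cs.length ∧ (pvSlice3 cs i = pvDq3 ∨ pvSlice3 cs i = pvSq3) then
      aOuter cs (aTripleScan cs (pvSlice3 cs i) (i + 3)) mask
    else if cs[i] = '"' ∨ cs[i] = '\'' then
      aOuter cs (aStringScan cs cs[i] (i + 1)) mask
    else if hc : cs[i] = '#' then
      aOuter cs (aCommentScan cs i mask).1 (aCommentScan cs i mask).2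
    else aOuter cs (i + 1) mask
  else mask
termination_by cs.length - i
decreasing_by
  · exact Nat.sub_lt_sub_left h (Nat.lt_of_lt_of_le
      (Nat.lt_add_of_pos_right (by decide)) (aTripleScan_ge cs (pvSlice3 cs i) (i + 3)))
  · exact Nat.sub_lt_sub_left h (Nat.lt_of_lt_of_le
      (Nat.lt_add_of_pos_right (by decide)) (aStringScan_ge cs cs[i] (i + 1)))
  · exact Nat.sub_lt_sub_left h (aCommentScan_gt cs i mask h (by rw [hc]; decide))
  · exact Nat.sub_lt_sub_left h (Nat.lt_add_of_pos_right (by decide))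

def compute_comment_mask_python_py (content : String) : List Int :=
  aOuter content.toList 0 []

-- ===== PORT B =====
-- one flat loop; st: 0 = NORMAL, 1 = IN_TRIPLE, 2 = IN_STRING, 3 = IN_COMMENT;
-- q holds the remembered quote (3 chars in state 1, 1 char in state 2)
def bLoop (cs : List Char) (st : Nat) (q : List Char) (i : Nat) (mask : List Int) : List Int :=
  if h : i < cs.length then
    if st = 0 then
      if i + 2 < cs.length ∧ (pvSlice3 cs i = pvDq3 ∨ pvSlice3 cs i = pvSq3) then
        bLoop cs 1 (pvSlice3 cs i) (i + 3) mask
      else if cs[i] = '"' ∨ cs[i] = '\'' then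
        bLoop cs 2 [cs[i]] (i + 1) mask
      else if cs[i] = '#' then
        bLoop cs 3 q (i + 1) (mask ++ [(i : Int)])
      else bLoop cs 0 q (i + 1) mask
    else if st = 1 then
      if cs[i] = '\\' ∧ i + 1 < cs.length then bLoop cs 1 q (i + 2) mask
      else if i + 2 < cs.length ∧ pvSlice3 cs i = q then bLoop cs 0 q (i + 3) mask
      else bLoop cs 1 q (i + 1) mask
    else if st = 2 then
      if cs[i] = '\n' then bLoop cs 0 q (i + 1) mask
      else if cs[i] = '\\' ∧ i + 1 < cs.length then bLoop cs 2 q (i + 2) mask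
      else if [cs[i]] = q then bLoop cs 0 q (i + 1) mask
      else bLoop cs 2 q (i + 1) mask
    else
      if cs[i] = '\n' then bLoop cs 0 q (i + 1) mask
      else bLoop cs 3 q (i + 1) (mask ++ [(i : Int)])
  else mask
termination_by cs.length - i
decreasing_by all_goals exact Nat.sub_lt_sub_left h (Nat.lt_add_of_pos_right (by decide))

def compute_comment_mask_python_py_alt (content : String) : List Int :=
  bLoop content.toList 0 [] 0 []

-- ===== PRECONDITION & SPEC =====
def Spec_compute_comment_mask_python_py (content : String) (out : List Int) : Prop := out = compute_comment_mask_python_py_alt content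
instance (content : String) (out : List Int) : Decidable (Spec_compute_comment_mask_python_py content out) := by unfold Spec_compute_comment_mask_python_py; infer_instance

-- ===== CLAIM (what is proved, stated in full; the proofs are below) =====
def Claim_equal_compute_comment_mask_python_py : Prop := ∀ (content : String), Dom_compute_comment_mask_python_py content → Spec_compute_comment_mask_python_py content (compute_comment_mask_python_py content)

-- ===== LEMMAS AND PROOFS =====

theorem pvSlice3_head (cs : List Char) (i : Nat) (h : i < cs.length) :
    (pvSlice3 cs i).head? = some cs[i] := by
  unfold pvSlice3
  simp [List.head?_take, List.head?_drop, h]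

-- the slice starting at i cannot be a triple quote when cs[i] is not that quote char
theorem not_triple_of_head (cs : List Char) (i : Nat) (h : i < cs.length)
    (hq : cs[i] ≠ '"') (hq' : cs[i] ≠ '\'') :
    ¬ (i + 2 < cs.length ∧ (pvSlice3 cs i = pvDq3 ∨ pvSlice3 cs i = pvSq3)) := by
  rintro ⟨-, hc | hc⟩
  · have hh := pvSlice3_head cs i h
    rw [hc] at hh
    simp only [pvDq3, List.head?_cons, Option.some.injEq] at hh
    exact hq hh.symm
  · have hh := pvSlice3_head cs i h
    rw [hc] at hh
    simp only [pvSq3, List.head?_cons, Option.some.injEq] at hh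
    exact hq' hh.symm

-- A's outer loop at a char that starts nothing just advances
theorem aOuter_step_plain (cs : List Char) (i : Nat) (mask : List Int) (h : i < cs.length)
    (hq : cs[i] ≠ '"') (hq' : cs[i] ≠ '\'') (hh : cs[i] ≠ '#') :
    aOuter cs i mask = aOuter cs (i + 1) mask := by
  rw [aOuter, dif_pos h, if_neg (not_triple_of_head cs i h hq hq'),
    if_neg (by simp [hq, hq'] : ¬(cs[i] = '"' ∨ cs[i] = '\'')), dif_neg hh]

-- the main bridge: B's four states track A's outer loop / three inner scans
theorem bridge (cs : List Char) : ∀ k i (mask : List Int), cs.length - i ≤ k →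
    (∀ q, bLoop cs 0 q i mask = aOuter cs i mask) ∧
    (∀ q, bLoop cs 1 q i mask = aOuter cs (aTripleScan cs q i) mask) ∧
    (∀ c, bLoop cs 2 [c] i mask = aOuter cs (aStringScan cs c i) mask) ∧
    (∀ q, bLoop cs 3 q i mask = aOuter cs (aCommentScan cs i mask).1 (aCommentScan cs i mask).2) := by
  intro k
  induction k with
  | zero =>
    intro i mask hk
    have hn : ¬ i < cs.length := by omega
    refine ⟨fun q => ?_, fun q => ?_, fun c => ?_, fun q => ?_⟩
    · rw [bLoop, dif_neg hn, aOuter, dif_neg hn]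
    · rw [bLoop, dif_neg hn, aTripleScan, dif_neg hn, aOuter, dif_neg hn]
    · rw [bLoop, dif_neg hn, aStringScan, dif_neg hn, aOuter, dif_neg hn]
    · rw [bLoop, dif_neg hn, aCommentScan, dif_neg hn, aOuter, dif_neg hn]
  | succ k ih =>
    intro i mask hk
    by_cases h : i < cs.length
    · refine ⟨fun q => ?_, fun q => ?_, fun c => ?_, fun q => ?_⟩
      · -- NORMAL
        rw [bLoop, aOuter, dif_pos h, dif_pos h]
        simp only [Nat.reduceEqDiff, if_false, if_true]
        by_cases ht : i + 2 < cs.length ∧ (pvSlice3 cs i = pvDq3 ∨ pvSlice3 cs i = pvSq3)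
        · simp only [if_pos ht]
          exact (ih (i + 3) mask (by omega)).2.1 _
        · simp only [if_neg ht]
          by_cases hqc : cs[i] = '"' ∨ cs[i] = '\''
          · simp only [if_pos hqc]
            exact (ih (i + 1) mask (by omega)).2.2.1 cs[i]
          · simp only [if_neg hqc]
            by_cases hc : cs[i] = '#'
            · rw [if_pos hc, dif_pos hc, aCommentScan, dif_pos h,
                if_neg (show ¬ cs[i] = '\n' by rw [hc]; decide)]
              exact (ih (i + 1) (mask ++ [(i : Int)]) (by omega)).2.2.2 q
            · rw [if_neg hc, dif_neg hc]
              exact (ih (i + 1) mask (by omega)).1 q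
      · -- IN_TRIPLE
        rw [bLoop, aTripleScan, dif_pos h, dif_pos h]
        simp only [Nat.reduceEqDiff, if_false, if_true]
        by_cases hes : cs[i] = '\\' ∧ i + 1 < cs.length
        · simp only [if_pos hes]
          exact (ih (i + 2) mask (by omega)).2.1 q
        · simp only [if_neg hes]
          by_cases hcl : i + 2 < cs.length ∧ pvSlice3 cs i = q
          · simp only [if_pos hcl]
            exact (ih (i + 3) mask (by omega)).1 q
          · simp only [if_neg hcl]
            exact (ih (i + 1) mask (by omega)).2.1 q
      · -- IN_STRING
        rw [bLoop, aStringScan, dif_pos h, dif_pos h]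
        simp only [Nat.reduceEqDiff, if_false, if_true]
        by_cases hnl : cs[i] = '\n'
        · simp only [if_pos hnl]
          rw [(ih (i + 1) mask (by omega)).1 [c],
            aOuter_step_plain cs i mask h (by rw [hnl]; decide) (by rw [hnl]; decide)
              (by rw [hnl]; decide)]
        · simp only [if_neg hnl]
          by_cases hes : cs[i] = '\\' ∧ i + 1 < cs.length
          · simp only [if_pos hes]
            exact (ih (i + 2) mask (by omega)).2.2.1 c
          · simp only [if_neg hes]
            by_cases hqc : cs[i] = c
            · simp only [if_pos (show [cs[i]] = [c] by rw [hqc]), if_pos hqc]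
              exact (ih (i + 1) mask (by omega)).1 [c]
            · simp only [if_neg (show ¬ [cs[i]] = [c] by simp [hqc]), if_neg hqc]
              exact (ih (i + 1) mask (by omega)).2.2.1 c
      · -- IN_COMMENT
        rw [bLoop, aCommentScan, dif_pos h, dif_pos h]
        simp only [Nat.reduceEqDiff, if_false]
        by_cases hnl : cs[i] = '\n'
        · simp only [if_pos hnl]
          rw [(ih (i + 1) mask (by omega)).1 q,
            aOuter_step_plain cs i mask h (by rw [hnl]; decide) (by rw [hnl]; decide)
              (by rw [hnl]; decide)]
        · simp only [if_neg hnl]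
          exact (ih (i + 1) (mask ++ [(i : Int)]) (by omega)).2.2.2 q
    · refine ⟨fun q => ?_, fun q => ?_, fun c => ?_, fun q => ?_⟩
      · rw [bLoop, dif_neg h, aOuter, dif_neg h]
      · rw [bLoop, dif_neg h, aTripleScan, dif_neg h, aOuter, dif_neg h]
      · rw [bLoop, dif_neg h, aStringScan, dif_neg h, aOuter, dif_neg h]
      · rw [bLoop, dif_neg h, aCommentScan, dif_neg h, aOuter, dif_neg h]

-- ===== VERDICT (by name: the statement is the Claim_ definition above) =====
theorem compute_comment_mask_python_py_spec : Claim_equal_compute_comment_mask_python_py := by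
  intro content _
  unfold Spec_compute_comment_mask_python_py compute_comment_mask_python_py
    compute_comment_mask_python_py_alt
  exact ((bridge content.toList content.toList.length 0 [] (by omega)).1 []).symm
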